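-- pv_equiv track=rewrite | github.com/raghavasvv/RUs-UHCL | pipeline/LOCAL_LLM/run_RUS_LLM.py | extract_option
-- ===== SOURCE A (Python) =====
-- def extract_option(text, options):
--     # First attempt: exact match
--     for opt in options:
--         if opt.lower() in text.lower():
--             return opt
--
--     # Fallback: match first keyword
--     words = text.lower().split()
--     for opt in options:
--         key = opt.lower().split()[0]
--         if key in words:
--             return opt
--
--     return ""
-- ===== SOURCE B (Python) =====
-- def extract_option(text, options):
--     # Single pass: lowercase text and its word list are computed once; a substring
--     # hit returns immediately (highest priority, earliest wins), while the first
--     # keyword hit is only remembered as a fallback candidate.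
--     text_lower = text.lower()
--     words = text_lower.split()
--     candidate = None
--     for opt in options:
--         low = opt.lower()
--         if low in text_lower:
--             return opt
--         if candidate is None:
--             ws = low.split()
--             if ws and ws[0] in words:
--                 candidate = opt
--     return candidate if candidate is not None else ""
-- ===== Notes on version B (the rewrite author's own statement) =====
-- stated objective: alternative
-- what changed: Two sequential scans over options (substring pass, then a keyword-fallback pass that re-lowercases and re-splits each option) are replaced by one pass that lowercases each option once, returns immediately on a substring hit, and merely remembers the first keyword hit as a fallback candidate.
-- outside the precondition, e.g. on extract_option('xy', ['xy q', '\t']): A returns 'xy q', B returns 'xy q'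
import Mathlib
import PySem

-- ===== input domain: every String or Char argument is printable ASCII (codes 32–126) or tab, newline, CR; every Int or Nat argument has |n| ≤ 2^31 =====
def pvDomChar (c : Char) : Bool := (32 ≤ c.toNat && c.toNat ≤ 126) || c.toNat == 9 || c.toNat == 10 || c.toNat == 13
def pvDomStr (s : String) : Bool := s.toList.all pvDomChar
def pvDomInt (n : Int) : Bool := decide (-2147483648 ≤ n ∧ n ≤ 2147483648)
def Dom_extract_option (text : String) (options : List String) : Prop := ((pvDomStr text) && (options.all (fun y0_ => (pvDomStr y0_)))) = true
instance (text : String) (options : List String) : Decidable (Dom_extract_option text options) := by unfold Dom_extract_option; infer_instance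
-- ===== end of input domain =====

-- B replaces A's two sequential scans of `options` by one scan that lowercases each
-- option once, returns at once on a substring hit and keeps the first keyword hit
-- as a fallback candidate (objective: alternative decomposition, same cost).

-- ===== PORT A =====
-- first loop: return the first option whose lowercase form is a substring of text.lower()
def pvPass1 (tl : String) : List String → Option String
  | [] => none
  | opt :: rest =>
    if PySem.Str.isIn (PySem.Str.lower opt) tl then some opt else pvPass1 tl rest

-- second loop: key = opt.lower().split()[0]; return opt if key in words
def pvPass2 (words : List String) : List String → String
  | [] => ""
  | opt :: rest =>
    match PySem.List.pyGet? (PySem.Str.split₀ (PySem.Str.lower opt)) 0 with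
    | none => ""   -- Python raises IndexError here; excluded by Pre_extract_option
    | some key => if words.contains key then opt else pvPass2 words rest

def extract_option (text : String) (options : List String) : String :=
  match pvPass1 (PySem.Str.lower text) options with
  | some o => o
  | none => pvPass2 (PySem.Str.split₀ (PySem.Str.lower text)) options

-- ===== PORT B =====
-- single pass over options with a fallback candidate
def pvBLoop (tl : String) (words : List String) (cand : Option String) : List String → String
  | [] => match cand with | some c => c | none => ""
  | opt :: rest =>
    let low := PySem.Str.lower opt
    if PySem.Str.isIn low tl then opt
    else
      let cand' : Option String :=
        match cand with
        | some _ => cand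
        | none =>
          match PySem.Str.split₀ low with
          | [] => none                           -- 'if ws and …' guard
          | k :: _ => if words.contains k then some opt else none
      pvBLoop tl words cand' rest

def extract_option_alt (text : String) (options : List String) : String :=
  let tl := PySem.Str.lower text
  pvBLoop tl (PySem.Str.split₀ tl) none options

-- ===== PRECONDITION & SPEC =====
-- Pre_ excludes inputs that contain a whitespace-only option AND have no substring match:
-- on those, A's keyword fallback raises IndexError on opt.lower().split()[0] whenever it
-- reaches such an option (A may still return first via an earlier keyword match — see
-- claim.json cites; B returns the same value there).
def Pre_extract_option (text : String) (options : List String) : Prop :=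
  (∃ opt ∈ options, PySem.Str.isIn (PySem.Str.lower opt) (PySem.Str.lower text) = true) ∨
  (∀ opt ∈ options, PySem.Str.split₀ (PySem.Str.lower opt) ≠ [])
instance (text : String) (options : List String) : Decidable (Pre_extract_option text options) := by
  unfold Pre_extract_option; infer_instance

def pvWitness_extract_option : String × List String := ("hello world", ["big world", "world cup"])

def Spec_extract_option (text : String) (options : List String) (out : String) : Prop := out = extract_option_alt text options
instance (text : String) (options : List String) (out : String) : Decidable (Spec_extract_option text options out) := by unfold Spec_extract_option; infer_instance

-- ===== CLAIM (what is proved, stated in full; the proofs are below) =====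
def Claim_equal_extract_option : Prop := ∀ (text : String) (options : List String), Dom_extract_option text options → Pre_extract_option text options → Spec_extract_option text options (extract_option text options)

-- ===== LEMMAS AND PROOFS =====

-- A's first loop succeeds as soon as some option's lowercase form occurs in the text.
theorem pvPass1_isSome (tl : String) (options : List String)
    (h : ∃ opt ∈ options, PySem.Str.isIn (PySem.Str.lower opt) tl = true) :
    (pvPass1 tl options).isSome := by
  induction options with
  | nil => simp at h
  | cons opt rest ih =>
    by_cases hin : PySem.Chars.isIn (PySem.Chars.lower opt.toList) tl.toList = true
    · simp [pvPass1, hin]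
    · rcases h with ⟨o, ho, hio⟩
      rcases List.mem_cons.mp ho with rfl | ho'
      · simp only [PySem.Str.isIn_eq, PySem.Str.toList_lower] at hio
        exact absurd hio hin
      · simpa [pvPass1, hin] using ih ⟨o, ho', hio⟩

-- when A's first loop returns, B's loop returns the same option, whatever the candidate.
theorem pvBLoop_of_pass1 (tl : String) (words : List String) (options : List String)
    (cand : Option String) (o : String) (h : pvPass1 tl options = some o) :
    pvBLoop tl words cand options = o := by
  induction options generalizing cand with
  | nil => simp [pvPass1] at h
  | cons opt rest ih =>
    by_cases hin : PySem.Chars.isIn (PySem.Chars.lower opt.toList) tl.toList = true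
    · have ho : opt = o := by simpa [pvPass1, hin] using h
      subst ho
      simp [pvBLoop, hin]
    · have h' : pvPass1 tl rest = some o := by simpa [pvPass1, hin] using h
      simp [pvBLoop, hin, ih _ h']

-- B's single loop equals A's two loops composed, for any pending candidate.
theorem pvBLoop_eq (tl : String) (words : List String) (options : List String)
    (cand : Option String)
    (h : ∀ opt ∈ options, PySem.Str.split₀ (PySem.Str.lower opt) ≠ []) :
    pvBLoop tl words cand options =
      (match pvPass1 tl options with
       | some o => o
       | none => match cand with | some c => c | none => pvPass2 words options) := by
  induction options generalizing cand with
  | nil => cases cand <;> simp [pvBLoop, pvPass1, pvPass2]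
  | cons opt rest ih =>
    have hopt := h opt (List.mem_cons_self ..)
    have hrest : ∀ o ∈ rest, PySem.Str.split₀ (PySem.Str.lower o) ≠ [] :=
      fun o ho => h o (List.mem_cons_of_mem _ ho)
    rcases hk : PySem.Str.split₀ (PySem.Str.lower opt) with _ | ⟨k, ks⟩
    · exact absurd hk hopt
    by_cases hin : PySem.Chars.isIn (PySem.Chars.lower opt.toList) tl.toList = true
    · simp [pvBLoop, pvPass1, hin]
    · cases cand with
      | some c =>
        simp [pvBLoop, pvPass1, hin, ih _ hrest]
      | none =>
        by_cases hkw : k ∈ words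
        · simp [pvBLoop, pvPass1, pvPass2, hin, hk, hkw, ih _ hrest]
        · simp [pvBLoop, pvPass1, pvPass2, hin, hk, hkw, ih _ hrest]

-- ===== VERDICT (by name: the statement is the Claim_ definition above) =====
theorem extract_option_spec : Claim_equal_extract_option := by
  intro text options _ hpre
  unfold Spec_extract_option extract_option extract_option_alt
  rcases hpre with hsub | hall
  · obtain ⟨o, ho⟩ := Option.isSome_iff_exists.mp (pvPass1_isSome _ _ hsub)
    rw [ho, pvBLoop_of_pass1 _ _ _ _ _ ho]
  · rw [pvBLoop_eq _ _ _ _ hall]
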